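-- pv_equiv track=rewrite | github.com/ivanjoz/genix | backend/libs/index_builder/refine_subdivided_categories.py | parse_productos_row
-- ===== SOURCE A (Python) =====
-- def parse_productos_row(raw_line: str) -> tuple[str, str, str] | None:
--     """Parse `Producto|Brand|Categories` rows."""
--     parts = [part.strip() for part in raw_line.split("|", 2)]
--     if len(parts) != 3:
--         return None
--     product_name, brand_name, categories_value = parts
--     if not product_name:
--         return None
--     return product_name, brand_name, categories_value
-- ===== SOURCE B (Python) =====
-- def parse_productos_row(raw_line: str) -> tuple[str, str, str] | None:
--     """Parse `Producto|Brand|Categories` rows.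
--
--     Single character-level pass with an explicit accumulator: the first two
--     unconsumed '|' act as field switches, every other character is appended
--     to the current field's buffer.
--     """
--     fields = ([], [], [])
--     k = 0
--     for ch in raw_line:
--         if ch == "|" and k < 2:
--             k += 1
--         else:
--             fields[k].append(ch)
--     if k != 2:
--         return None
--     product_name = "".join(fields[0]).strip()
--     if not product_name:
--         return None
--     return product_name, "".join(fields[1]).strip(), "".join(fields[2]).strip()
-- ===== Notes on version B (the rewrite author's own statement) =====
-- stated objective: alternative
-- what changed: Replaces the maxsplit-2 split plus list-comprehension strip and length check by a single explicit character loop with a field-index accumulator: the first two pipe separators switch the active buffer, every other character is appended to it, and the three buffers are joined and stripped at the end.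
import Mathlib
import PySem

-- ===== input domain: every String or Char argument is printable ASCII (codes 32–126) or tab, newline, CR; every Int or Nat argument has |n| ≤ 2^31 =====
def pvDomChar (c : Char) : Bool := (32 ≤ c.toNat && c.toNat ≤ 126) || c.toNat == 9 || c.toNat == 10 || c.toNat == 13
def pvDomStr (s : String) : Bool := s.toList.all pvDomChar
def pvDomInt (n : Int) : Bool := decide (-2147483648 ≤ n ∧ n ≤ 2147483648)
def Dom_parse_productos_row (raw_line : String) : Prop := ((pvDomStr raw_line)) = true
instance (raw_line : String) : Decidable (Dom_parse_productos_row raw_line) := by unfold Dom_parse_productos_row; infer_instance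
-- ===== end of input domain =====

-- B replaces split('|', 2) + list-comprehension strip + length check by one explicit character loop with a field-index accumulator: a different decomposition, same cost.


-- ===== PORT A =====
def parse_productos_row (raw_line : String) : Option (String × String × String) :=
  match PySem.Str.splitMax? raw_line "|" 2 with
  | none => none  -- unreachable: separator "|" is nonempty
  | some ps =>
    let parts := ps.map PySem.Str.strip
    if parts.length ≠ 3 then none
    else match parts with
      | [product_name, brand_name, categories_value] =>
        if product_name = "" then none
        else some (product_name, brand_name, categories_value)
      | _ => none  -- unreachable: length is 3

-- ===== PORT B =====
-- the explicit character loop of Source B: state = (field index k, the three buffers);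
-- buffers are built reversed (cons) and reversed once at the end (Python appends).
def pvScan : List Char → Nat → List Char → List Char → List Char →
    Nat × List Char × List Char × List Char
  | [], k, f0, f1, f2 => (k, f0.reverse, f1.reverse, f2.reverse)
  | c :: rest, k, f0, f1, f2 =>
    if c = '|' ∧ k < 2 then pvScan rest (k + 1) f0 f1 f2
    else if k = 0 then pvScan rest k (c :: f0) f1 f2
    else if k = 1 then pvScan rest k f0 (c :: f1) f2
    else pvScan rest k f0 f1 (c :: f2)

def parse_productos_row_alt (raw_line : String) : Option (String × String × String) :=
  let r := pvScan raw_line.toList 0 [] [] []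
  if r.1 ≠ 2 then none
  else
    let product_name := PySem.Chars.strip r.2.1
    if product_name.isEmpty then none
    else some (String.ofList product_name,
               String.ofList (PySem.Chars.strip r.2.2.1),
               String.ofList (PySem.Chars.strip r.2.2.2))

-- ===== PRECONDITION & SPEC =====
def Spec_parse_productos_row (raw_line : String) (out : Option (String × String × String)) : Prop := out = parse_productos_row_alt raw_line
instance (raw_line : String) (out : Option (String × String × String)) : Decidable (Spec_parse_productos_row raw_line out) := by unfold Spec_parse_productos_row; infer_instance

-- ===== CLAIM (what is proved, stated in full; the proofs are below) =====
def Claim_equal_parse_productos_row : Prop := ∀ (raw_line : String), Dom_parse_productos_row raw_line → Spec_parse_productos_row raw_line (parse_productos_row raw_line)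

-- ===== LEMMAS AND PROOFS =====

-- proof-side characterisation device: first '|'-partition of a char list
-- (none = no '|'); both ports are reduced to it.
def pvPartitionBar (cs : List Char) : Option (List Char × List Char) :=
  match cs with
  | [] => none
  | c :: rest =>
    if c = '|' then some ([], rest)
    else (pvPartitionBar rest).map (fun p => (c :: p.1, p.2))

-- go with m = 0 returns at once: the remaining characters all join the current piece.
theorem go_zero (l cur : List Char) (acc : List (List Char)) (fuel : Nat) (h : 0 < fuel) :
    PySem.Chars.splitOnMax.go ['|'] fuel 0 l cur acc = acc.reverse ++ [cur.reverse ++ l] := by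
  cases fuel with
  | zero => omega
  | succ n =>
    cases l with
    | nil =>
      rw [PySem.Chars.splitOnMax.go]
      · simp
      · omega
    | cons c rest => rw [PySem.Chars.splitOnMax.go]; simp

-- go with one split left is the first partition.
theorem go_one (l : List Char) : ∀ (fuel : Nat) (cur : List Char) (acc : List (List Char)),
    l.length < fuel →
    PySem.Chars.splitOnMax.go ['|'] fuel 1 l cur acc =
      match pvPartitionBar l with
      | none => acc.reverse ++ [cur.reverse ++ l]
      | some (h, r) => acc.reverse ++ [cur.reverse ++ h, r] := by
  induction l with
  | nil =>
    intro fuel cur acc hf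
    cases fuel with
    | zero => omega
    | succ n =>
      rw [PySem.Chars.splitOnMax.go]
      · simp [pvPartitionBar]
      · omega
  | cons c rest ih =>
    intro fuel cur acc hf
    cases fuel with
    | zero => simp at hf
    | succ n =>
      rw [PySem.Chars.splitOnMax.go]
      by_cases hc : c = '|'
      · subst hc
        have hpre : (['|'].isPrefixOf ('|' :: rest)) = true := by simp [List.isPrefixOf]
        simp only [hpre, if_true]
        have hrest : rest.length < n := by simp at hf; omega
        simp [go_zero rest [] (cur.reverse :: acc) n (by omega), pvPartitionBar]
      · have hpre : (['|'].isPrefixOf (c :: rest)) = false := by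
          simp [List.isPrefixOf]; exact fun h => hc h.symm
        simp only [hpre]
        rw [ih n (c :: cur) acc (by simp at hf; omega)]
        simp only [pvPartitionBar, if_neg hc]
        cases hp : pvPartitionBar rest with
        | none => simp
        | some p => cases p; simp

-- go with two splits left is two partitions.
theorem go_two (l : List Char) : ∀ (fuel : Nat) (cur : List Char) (acc : List (List Char)),
    l.length < fuel →
    PySem.Chars.splitOnMax.go ['|'] fuel 2 l cur acc =
      match pvPartitionBar l with
      | none => acc.reverse ++ [cur.reverse ++ l]
      | some (h, r) =>
        match pvPartitionBar r with
        | none => acc.reverse ++ [cur.reverse ++ h, r]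
        | some (m, t) => acc.reverse ++ [cur.reverse ++ h, m, t] := by
  induction l with
  | nil =>
    intro fuel cur acc hf
    cases fuel with
    | zero => omega
    | succ n =>
      rw [PySem.Chars.splitOnMax.go]
      · simp [pvPartitionBar]
      · omega
  | cons c rest ih =>
    intro fuel cur acc hf
    cases fuel with
    | zero => simp at hf
    | succ n =>
      rw [PySem.Chars.splitOnMax.go]
      by_cases hc : c = '|'
      · subst hc
        have hpre : (['|'].isPrefixOf ('|' :: rest)) = true := by simp [List.isPrefixOf]
        simp only [hpre, if_true]
        have hrest : rest.length < n := by simp at hf; omega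
        rw [show (2 - 1 : Nat) = 1 from rfl, show List.drop (['|'].length) ('|' :: rest) = rest from rfl]
        rw [go_one rest n [] (cur.reverse :: acc) hrest]
        cases hp : pvPartitionBar rest with
        | none => simp [pvPartitionBar, hp]
        | some p => cases p; simp [pvPartitionBar, hp]
      · have hpre : (['|'].isPrefixOf (c :: rest)) = false := by
          simp [List.isPrefixOf]; exact fun h => hc h.symm
        simp only [hpre]
        rw [ih n (c :: cur) acc (by simp at hf; omega)]
        cases hp : pvPartitionBar rest with
        | none => simp [pvPartitionBar, if_neg hc, hp]
        | some p =>
          obtain ⟨h1, r1⟩ := p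
          cases hq : pvPartitionBar r1 with
          | none => simp [pvPartitionBar, if_neg hc, hp, hq]
          | some q => cases q; simp [pvPartitionBar, if_neg hc, hp, hq]

-- the top-level characterisation of A's split
theorem splitOnMax_two (l : List Char) :
    PySem.Chars.splitOnMax l ['|'] 2 =
      match pvPartitionBar l with
      | none => [l]
      | some (h, r) =>
        match pvPartitionBar r with
        | none => [h, r]
        | some (m, t) => [h, m, t] := by
  unfold PySem.Chars.splitOnMax
  rw [if_neg (by norm_num), show ((2 : Int).toNat) = 2 from rfl]
  rw [go_two l (l.length + 1) [] [] (by omega)]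
  cases pvPartitionBar l with
  | none => simp
  | some p =>
    obtain ⟨h, r⟩ := p
    cases pvPartitionBar r with
    | none => simp
    | some q => cases q; simp

-- pvScan in state k = 2: every remaining character joins the third buffer.
theorem pvScan_two (l : List Char) : ∀ (f0 f1 f2 : List Char),
    pvScan l 2 f0 f1 f2 = (2, f0.reverse, f1.reverse, f2.reverse ++ l) := by
  induction l with
  | nil => intro f0 f1 f2; simp [pvScan]
  | cons c rest ih => intro f0 f1 f2; simp [pvScan, ih]

-- pvScan in state k = 1 is the first partition of the remainder.
theorem pvScan_one (l : List Char) : ∀ (f0 f1 f2 : List Char),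
    pvScan l 1 f0 f1 f2 =
      match pvPartitionBar l with
      | none => (1, f0.reverse, f1.reverse ++ l, f2.reverse)
      | some (m, t) => (2, f0.reverse, f1.reverse ++ m, f2.reverse ++ t) := by
  induction l with
  | nil => intro f0 f1 f2; simp [pvScan, pvPartitionBar]
  | cons c rest ih =>
    intro f0 f1 f2
    by_cases hc : c = '|'
    · subst hc
      simp [pvScan, pvPartitionBar, pvScan_two]
    · rw [show pvScan (c :: rest) 1 f0 f1 f2 = pvScan rest 1 f0 (c :: f1) f2 by
        simp [pvScan, hc]]
      rw [ih]
      simp only [pvPartitionBar, if_neg hc]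
      cases hp : pvPartitionBar rest with
      | none => simp
      | some p => cases p; simp

-- pvScan from the initial state is two partitions.
theorem pvScan_zero (l : List Char) : ∀ (f0 f1 f2 : List Char),
    pvScan l 0 f0 f1 f2 =
      match pvPartitionBar l with
      | none => (0, f0.reverse ++ l, f1.reverse, f2.reverse)
      | some (h, r) =>
        match pvPartitionBar r with
        | none => (1, f0.reverse ++ h, f1.reverse ++ r, f2.reverse)
        | some (m, t) => (2, f0.reverse ++ h, f1.reverse ++ m, f2.reverse ++ t) := by
  induction l with
  | nil => intro f0 f1 f2; simp [pvScan, pvPartitionBar]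
  | cons c rest ih =>
    intro f0 f1 f2
    by_cases hc : c = '|'
    · subst hc
      rw [show pvScan ('|' :: rest) 0 f0 f1 f2 = pvScan rest 1 f0 f1 f2 by simp [pvScan]]
      rw [pvScan_one]
      simp only [pvPartitionBar]
      cases hp : pvPartitionBar rest with
      | none => simp [hp]
      | some p => cases p; simp [hp]
    · rw [show pvScan (c :: rest) 0 f0 f1 f2 = pvScan rest 0 (c :: f0) f1 f2 by
        simp [pvScan, hc]]
      rw [ih]
      simp only [pvPartitionBar, if_neg hc]
      cases hp : pvPartitionBar rest with
      | none => simp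
      | some p =>
        obtain ⟨h1, r1⟩ := p
        cases hq : pvPartitionBar r1 with
        | none => simp
        | some q => cases q; simp

-- ===== VERDICT (by name: the statement is the Claim_ definition above) =====
theorem parse_productos_row_spec : Claim_equal_parse_productos_row := by
  intro raw_line _
  unfold Spec_parse_productos_row parse_productos_row parse_productos_row_alt
  have hsplit : PySem.Str.splitMax? raw_line "|" 2 =
      some ((PySem.Chars.splitOnMax raw_line.toList ['|'] 2).map String.ofList) := by
    simp [PySem.Str.splitMax?, PySem.Chars.splitMax?]
  rw [hsplit, splitOnMax_two, pvScan_zero]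
  cases hp : pvPartitionBar raw_line.toList with
  | none => simp
  | some p =>
    obtain ⟨h1, r1⟩ := p
    cases hq : pvPartitionBar r1 with
    | none =>
      simp only [hq, List.map_cons, List.map_nil, List.length_cons, List.length_nil]
      simp
    | some q =>
      obtain ⟨m1, t1⟩ := q
      simp only [hq, List.map_cons, List.map_nil, List.length_cons, List.length_nil]
      rw [if_neg (by norm_num)]
      have hs : ∀ cs : List Char, PySem.Str.strip (String.ofList cs) = String.ofList (PySem.Chars.strip cs) := by
        intro cs; simp [PySem.Str.strip]
      simp only [hs]
      by_cases he : PySem.Chars.strip h1 = []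
      · simp [he]
      · rw [if_neg ?_]
        · simp [List.isEmpty_iff, he]
        · intro hcontra
          apply he
          have h' := congrArg String.toList hcontra
          simpa using h'
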